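-- pv_equiv track=rewrite | github.com/jcolinpatrick/kryptos | scripts/substitution/e_four_square_comprehensive.py | keyword_square
-- ===== SOURCE A (Python) =====
-- def keyword_square(keyword, alphabet):
--     """Generate keyword-mixed alphabet."""
--     seen = set()
--     result = []
--     for ch in keyword.upper():
--         if ch in alphabet and ch not in seen:
--             result.append(ch)
--             seen.add(ch)
--     for ch in alphabet:
--         if ch not in seen:
--             result.append(ch)
--             seen.add(ch)
--     return ''.join(result)
-- ===== SOURCE B (Python) =====
-- def keyword_square(keyword, alphabet):
--     """Generate keyword-mixed alphabet."""
--     combined = [ch for ch in keyword.upper() if ch in alphabet] + list(alphabet)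
--     first = {ch: i for i, ch in reversed(list(enumerate(combined)))}
--     return ''.join(sorted(first, key=lambda ch: first[ch]))
-- ===== Notes on version B (the rewrite author's own statement) =====
-- stated objective: alternative
-- what changed: Instead of A's two guarded append loops with a mutable seen-set, B builds a first-occurrence index map (a dict comprehension over the reversed enumeration of keyword-filtered-plus-alphabet, so earlier entries win) and produces the result by sorting the distinct characters by that index.
import Mathlib
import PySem

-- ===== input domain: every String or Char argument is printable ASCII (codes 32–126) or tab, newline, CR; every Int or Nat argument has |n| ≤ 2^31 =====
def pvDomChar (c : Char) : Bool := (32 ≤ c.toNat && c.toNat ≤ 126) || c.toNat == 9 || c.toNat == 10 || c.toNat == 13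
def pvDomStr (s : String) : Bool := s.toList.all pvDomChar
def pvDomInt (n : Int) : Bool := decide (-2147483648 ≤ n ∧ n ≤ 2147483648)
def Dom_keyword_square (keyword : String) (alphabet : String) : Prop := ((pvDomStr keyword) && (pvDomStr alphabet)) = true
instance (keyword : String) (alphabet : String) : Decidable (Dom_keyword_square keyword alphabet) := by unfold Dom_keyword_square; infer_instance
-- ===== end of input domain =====

-- B replaces A's two guarded append loops over a seen-set by an index-map-then-sort algorithm (objective: alternative, not faster).
-- ===== PORT A =====
def keyword_square (keyword : String) (alphabet : String) : String :=
  let st0 : PySem.Set Char × List Char := (PySem.Set.empty, [])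
  let st1 := (PySem.Chars.upper keyword.toList).foldl
    (fun (st : PySem.Set Char × List Char) ch =>
      if PySem.Chars.isIn [ch] alphabet.toList && !(PySem.Set.contains st.1 ch) then
        (PySem.Set.add st.1 ch, st.2 ++ [ch])
      else st) st0
  let st2 := alphabet.toList.foldl
    (fun (st : PySem.Set Char × List Char) ch =>
      if !(PySem.Set.contains st.1 ch) then
        (PySem.Set.add st.1 ch, st.2 ++ [ch])
      else st) st1
  String.ofList st2.2

-- ===== PORT B =====
def keyword_square_alt (keyword : String) (alphabet : String) : String :=
  let combined :=
    ((PySem.Chars.upper keyword.toList).filter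
      (fun ch => PySem.Chars.isIn [ch] alphabet.toList)) ++ alphabet.toList
  -- dict comprehension over reversed(list(enumerate(combined))): later (= earlier-in-combined) entries overwrite
  let first : PySem.Dict Char Int :=
    ((PySem.List.enumerate combined 0).reverse).foldl
      (fun (d : PySem.Dict Char Int) p => d.insert p.2 p.1) PySem.Dict.empty
  -- first[ch]: every ch sorted ranges over is a key of first, so getD with default 0 is exact here
  String.ofList (PySem.List.sorted first.keys (fun ch => first.getD ch 0) false)

-- ===== PRECONDITION & SPEC =====
def Spec_keyword_square (keyword : String) (alphabet : String) (out : String) : Prop := out = keyword_square_alt keyword alphabet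
instance (keyword : String) (alphabet : String) (out : String) : Decidable (Spec_keyword_square keyword alphabet out) := by unfold Spec_keyword_square; infer_instance

-- ===== CLAIM (what is proved, stated in full; the proofs are below) =====
def Claim_equal_keyword_square : Prop := ∀ (keyword : String) (alphabet : String), Dom_keyword_square keyword alphabet → Spec_keyword_square keyword alphabet (keyword_square keyword alphabet)

-- ===== LEMMAS AND PROOFS =====

-- A's guarded seen/result loop keeps its two components equal and equals a Set.add fold over the filtered list.
theorem pv_loop_pair (pred : Char → Bool) :
    ∀ (l : List Char) (s : List Char),
      l.foldl
        (fun (st : PySem.Set Char × List Char) ch =>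
          if pred ch && !(PySem.Set.contains st.1 ch) then
            (PySem.Set.add st.1 ch, st.2 ++ [ch])
          else st) (s, s)
      = ((l.filter pred).foldl PySem.Set.add s, (l.filter pred).foldl PySem.Set.add s) := by
  intro l
  induction l with
  | nil => intro s; rfl
  | cons ch t ih =>
    intro s
    rw [List.foldl_cons, List.filter_cons]
    dsimp only
    by_cases hp : pred ch = true
    · by_cases hm : ch ∈ s
      · have hc : PySem.Set.contains s ch = true := by simp [PySem.Set.contains, hm]
        have hadd : PySem.Set.add s ch = s := by simp [PySem.Set.add, PySem.Set.contains, hm]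
        have h1 : (if (pred ch && !(PySem.Set.contains s ch)) = true then
              (PySem.Set.add s ch, s ++ [ch]) else ((s, s) : PySem.Set Char × List Char)) = (s, s) := by
          rw [hp, hc]; simp
        rw [h1, ih, if_pos hp, List.foldl_cons, hadd]
      · have hc : PySem.Set.contains s ch = false := by simp [PySem.Set.contains, hm]
        have hadd : PySem.Set.add s ch = s ++ [ch] := by simp [PySem.Set.add, PySem.Set.contains, hm]
        have h1 : (if (pred ch && !(PySem.Set.contains s ch)) = true then
              (PySem.Set.add s ch, s ++ [ch]) else ((s, s) : PySem.Set Char × List Char))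
            = (s ++ [ch], s ++ [ch]) := by
          rw [hp, hc, hadd]; simp
        rw [h1, ih, if_pos hp, List.foldl_cons, hadd]
    · have hp' : pred ch = false := by simpa using hp
      have h1 : (if (pred ch && !(PySem.Set.contains s ch)) = true then
            (PySem.Set.add s ch, s ++ [ch]) else ((s, s) : PySem.Set Char × List Char)) = (s, s) := by
        rw [hp']; simp
      rw [h1, ih, if_neg hp]

-- A's second loop (no alphabet-membership guard) in the same pair form.
theorem pv_loop_pair2 :
    ∀ (l : List Char) (s : List Char),
      l.foldl
        (fun (st : PySem.Set Char × List Char) ch =>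
          if !(PySem.Set.contains st.1 ch) then
            (PySem.Set.add st.1 ch, st.2 ++ [ch])
          else st) (s, s)
      = (l.foldl PySem.Set.add s, l.foldl PySem.Set.add s) := by
  intro l
  induction l with
  | nil => intro s; rfl
  | cons ch t ih =>
    intro s
    rw [List.foldl_cons, List.foldl_cons]
    dsimp only
    by_cases hm : ch ∈ s
    · have hc : PySem.Set.contains s ch = true := by simp [PySem.Set.contains, hm]
      have hadd : PySem.Set.add s ch = s := by simp [PySem.Set.add, PySem.Set.contains, hm]
      have h1 : (if (!(PySem.Set.contains s ch)) = true then
            (PySem.Set.add s ch, s ++ [ch]) else ((s, s) : PySem.Set Char × List Char)) = (s, s) := by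
        rw [hc]; simp
      rw [h1, ih, hadd]
    · have hc : PySem.Set.contains s ch = false := by simp [PySem.Set.contains, hm]
      have hadd : PySem.Set.add s ch = s ++ [ch] := by simp [PySem.Set.add, PySem.Set.contains, hm]
      have h1 : (if (!(PySem.Set.contains s ch)) = true then
            (PySem.Set.add s ch, s ++ [ch]) else ((s, s) : PySem.Set Char × List Char))
          = (s ++ [ch], s ++ [ch]) := by
        rw [hc, hadd]; simp
      rw [h1, ih, hadd]

-- lookup in the dict built by inserting the reversed pair list = first matching pair of the original list
theorem pv_get?_rev_fold (ps : List (Int × Char)) (d : PySem.Dict Char Int) (k : Char) :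
    (ps.reverse.foldl (fun (d : PySem.Dict Char Int) p => d.insert p.2 p.1) d).get? k
    = (match ps.find? (fun p => decide (p.2 = k)) with
       | some p => some p.1
       | none => d.get? k) := by
  induction ps with
  | nil => rfl
  | cons q t ih =>
    rw [List.reverse_cons, List.foldl_append, List.foldl_cons, List.foldl_nil,
        PySem.Dict.get?_insert]
    by_cases hq : q.2 = k
    · simp [hq]
    · have hqd : (decide (q.2 = k)) = false := decide_eq_false hq
      rw [if_neg (fun h => hq h.symm), ih]
      simp only [List.find?_cons, hqd]

-- find? over the enumeration returns the first-occurrence index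
theorem pv_find?_enumerate (k : Char) :
    ∀ (c : List Char) (s : Int), k ∈ c →
      (PySem.List.enumerate c s).find? (fun p => decide (p.2 = k))
        = some (s + (c.idxOf k : Int), k) := by
  intro c
  induction c with
  | nil => intro s h; cases h
  | cons x t ih =>
    intro s h
    rw [PySem.List.enumerate_cons, List.find?_cons]
    by_cases hx : x = k
    · subst hx
      simp [List.idxOf_cons_self]
    · have hk : k ∈ t := by cases h with
        | head => exact absurd rfl hx
        | tail _ h => exact h
      have : (decide ((s, x).2 = k)) = false := by simp [hx]
      rw [this, ih (s + 1) hk]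
      have : (x :: t).idxOf k = t.idxOf k + 1 := by
        simp [hx]
      rw [this]
      push_cast
      ring_nf

-- first-occurrence dedup is strictly increasing in first-occurrence index
theorem pv_ofList_pairwise_idxOf :
    ∀ (c : List Char), (PySem.Set.ofList c).Pairwise (fun a b => c.idxOf a < c.idxOf b) := by
  intro c
  induction c with
  | nil => simp [PySem.Set.ofList_nil]
  | cons x t ih =>
    rw [PySem.Set.ofList_cons]
    constructor
    · intro b hb
      have hb' := (PySem.Set.mem_discard _ _ _).1 hb
      have hbt : b ∈ t := (PySem.Set.mem_ofList _ _).1 hb'.1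
      have hbx : b ≠ x := hb'.2
      rw [List.idxOf_cons_self]
      simp [Ne.symm hbx]
    · have hsub : (PySem.Set.discard (PySem.Set.ofList t) x).Sublist (PySem.Set.ofList t) := by
        simp [PySem.Set.discard]
      have hpw := ih.sublist hsub
      refine hpw.imp_of_mem ?_
      intro a b ha hb hab
      have hax : a ≠ x := ((PySem.Set.mem_discard _ _ _).1 ha).2
      have hbx : b ≠ x := ((PySem.Set.mem_discard _ _ _).1 hb).2
      simp [Ne.symm hax, Ne.symm hbx]
      omega

-- ===== VERDICT (by name: the statement is the Claim_ definition above) =====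
theorem keyword_square_spec : Claim_equal_keyword_square := by
  intro keyword alphabet _
  unfold Spec_keyword_square keyword_square keyword_square_alt
  dsimp only
  set pred : Char → Bool := fun ch => PySem.Chars.isIn [ch] alphabet.toList with hpred
  set c : List Char := ((PySem.Chars.upper keyword.toList).filter pred) ++ alphabet.toList with hc
  -- A's side: result = Set.ofList c
  have he : (PySem.Set.empty : PySem.Set Char) = ([] : List Char) := rfl
  rw [he, pv_loop_pair, pv_loop_pair2]
  set D : PySem.Dict Char Int :=
    ((PySem.List.enumerate c 0).reverse).foldl
      (fun (d : PySem.Dict Char Int) p => d.insert p.2 p.1) PySem.Dict.empty with hD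
  -- B's key function equals first-occurrence index on members of c
  have hget : ∀ k ∈ c, D.getD k 0 = (c.idxOf k : Int) := by
    intro k hk
    have h1 := pv_get?_rev_fold (PySem.List.enumerate c 0) PySem.Dict.empty k
    have h2 : (PySem.List.enumerate c 0).find? (fun p => decide (p.2 = k))
        = some ((0 : Int) + (c.idxOf k : Int), k) := pv_find?_enumerate k c 0 hk
    rw [PySem.Dict.getD_eq_get?_getD, h1, h2]
    simp
  -- keys of D are the distinct elements of c (in some order)
  have hkeys : D.keys = PySem.Set.ofList c.reverse := by
    rw [hD, PySem.Dict.keys_foldl_insert_key (key := fun p : Int × Char => p.2)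
          (f := fun (_ : PySem.Dict Char Int) (p : Int × Char) => p.1)]
    simp [PySem.Dict.keys_empty, PySem.Set.update_nil_left, PySem.List.map_snd_enumerate]
  have hperm : (PySem.Set.ofList c).Perm D.keys := by
    rw [hkeys]
    rw [List.perm_ext_iff_of_nodup (PySem.Set.nodup_ofList _) (PySem.Set.nodup_ofList _)]
    intro a
    simp [PySem.Set.mem_ofList _ a]
  have hpair : (PySem.Set.ofList c).Pairwise (fun a b => D.getD a 0 < D.getD b 0) := by
    refine (pv_ofList_pairwise_idxOf c).imp_of_mem ?_
    intro a b ha hb hab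
    have ha' : a ∈ c := (PySem.Set.mem_ofList _ _).1 ha
    have hb' : b ∈ c := (PySem.Set.mem_ofList _ _).1 hb
    rw [hget a ha', hget b hb']
    exact_mod_cast hab
  have hsorted : PySem.List.sorted D.keys (fun ch => D.getD ch 0) false = PySem.Set.ofList c :=
    PySem.List.sorted_eq_of_perm_of_pairwise_lt _ _ _ hperm hpair
  rw [hsorted]
  congr 1
  rw [PySem.Set.ofList_eq_foldl, hc, List.foldl_append]
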